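-- pv_equiv track=rewrite | github.com/Aashishthakur10/leetcode | deleteDigit.py | deleteDigit
-- ===== SOURCE A (Python) =====
-- def deleteDigit(n):
--     strVal = str(n)
--     index = 0
--     min = 9999
--     for i in range(len(strVal)):
--         tst = int(strVal[i])
--         if int(strVal[i]) < min:
--             min = int(strVal[i])
--             index = i
--
--     return int(strVal[:index] + strVal[index+1:])
-- ===== SOURCE B (Python) =====
-- def deleteDigit(n):
--     s = str(n)
--     c = next(d for d in "0123456789" if d in s)
--     i = s.index(c)
--     return int(s[:i] + s[i + 1:])
-- ===== Notes on version B (the rewrite author's own statement) =====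
-- stated objective: alternative
-- what changed: Replaces A's positional running-argmin scan (index/min state with a large sentinel, one int() per position) by a search over the ten digit VALUES: try '0'..'9' in increasing order, take the first one that occurs in str(n) as a substring, and delete its first occurrence.
import Mathlib
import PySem

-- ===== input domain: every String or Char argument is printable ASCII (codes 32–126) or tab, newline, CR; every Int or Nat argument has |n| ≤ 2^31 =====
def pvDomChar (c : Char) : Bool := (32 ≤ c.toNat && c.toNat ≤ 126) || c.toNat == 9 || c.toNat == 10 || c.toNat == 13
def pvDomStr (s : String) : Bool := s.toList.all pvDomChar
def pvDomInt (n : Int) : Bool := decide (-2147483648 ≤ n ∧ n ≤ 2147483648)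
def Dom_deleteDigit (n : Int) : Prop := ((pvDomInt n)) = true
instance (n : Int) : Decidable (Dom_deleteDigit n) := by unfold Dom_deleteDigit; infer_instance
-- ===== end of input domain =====

-- B searches the ten digit values '0'..'9' smallest-first and deletes the first occurrence of the
-- first one present, instead of A's positional running-argmin scan; objective: alternative.

-- ===== PORT A =====
-- A: one pass over str(n) keeping a running (index, min) with a large sentinel, then slice out that index.
def deleteDigit (n : Int) : Int :=
  let strVal := PySem.Int.toChars n
  let st := (PySem.List.pyRange 0 (PySem.List.len strVal) 1).foldl
      (fun (st : Int × Int) i =>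
        if (PySem.Int.ofChars? [PySem.List.pyGetD strVal i '0']).getD 0 < st.2
        then (i, (PySem.Int.ofChars? [PySem.List.pyGetD strVal i '0']).getD 0)
        else st) (0, 9999)
  (PySem.Int.ofChars? (PySem.List.slice strVal none (some st.1) ++
      PySem.List.slice strVal (some (st.1 + 1)) none)).getD 0

-- ===== PORT B =====
-- the literal "0123456789" B iterates over
def pvDigitChars : List Char := ['0','1','2','3','4','5','6','7','8','9']

-- B: first digit value of '0'..'9' occurring in str(n) (next(...) over the generator;
-- getD covers the StopIteration case, unreachable under Pre_), then delete its first occurrence.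
def deleteDigit_alt (n : Int) : Int :=
  let s := PySem.Int.toChars n
  let c := (pvDigitChars.find? (fun d => PySem.Chars.isIn [d] s)).getD '0'
  let i : Nat := (PySem.List.index? s c).getD 0
  (PySem.Int.ofChars? (PySem.List.slice s none (some (i : Int)) ++
      PySem.List.slice s (some ((i : Int) + 1)) none)).getD 0

-- ===== PRECONDITION & SPEC =====
-- Pre_ excludes exactly the inputs on which A raises ValueError: all n < 10
-- (single-digit n reach int(''), negative n reach int('-')); A returns normally iff 10 ≤ n.
def Pre_deleteDigit (n : Int) : Prop := 10 ≤ n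
instance (n : Int) : Decidable (Pre_deleteDigit n) := by unfold Pre_deleteDigit; infer_instance
def pvWitness_deleteDigit : Int := 10

def Spec_deleteDigit (n : Int) (out : Int) : Prop := out = deleteDigit_alt n
instance (n : Int) (out : Int) : Decidable (Spec_deleteDigit n out) := by unfold Spec_deleteDigit; infer_instance

-- ===== CLAIM (what is proved, stated in full; the proofs are below) =====
def Claim_equal_deleteDigit : Prop := ∀ (n : Int), Dom_deleteDigit n → Pre_deleteDigit n → Spec_deleteDigit n (deleteDigit n)

-- ===== LEMMAS AND PROOFS =====

-- int(c) — the digit value both ports read out of one character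
def pvDval (c : Char) : Int := (PySem.Int.ofChars? [c]).getD 0

-- A's loop body as a function of the state and an (index, char) pair
def pvStepC (st : Int × Int) (p : Int × Char) : Int × Int :=
  if pvDval p.2 < st.2 then (p.1, pvDval p.2) else st

-- the same on already-parsed (index, digit-value) pairs
def pvStep (st : Int × Int) (p : Int × Int) : Int × Int :=
  if p.2 < st.2 then (p.1, p.2) else st

theorem pv_dval_lt : ∀ c ∈ pvDigitChars, pvDval c < 9999 := by
  intro c hc
  fin_cases hc <;> decide

theorem pv_dval_inj : ∀ c ∈ pvDigitChars, ∀ d ∈ pvDigitChars, pvDval c = pvDval d → c = d := by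
  intro c hc d hd
  fin_cases hc <;> fin_cases hd <;> decide

theorem pv_digitChar_mem (k : Nat) (h : k < 10) : Nat.digitChar k ∈ pvDigitChars := by
  interval_cases k <;> decide

theorem pv_toDigitsCore_mem (fuel : Nat) : ∀ (n : Nat) (acc : List Char),
    (∀ c ∈ acc, c ∈ pvDigitChars) →
    ∀ c ∈ Nat.toDigitsCore 10 fuel n acc, c ∈ pvDigitChars := by
  induction fuel with
  | zero => intro n acc hacc; simpa [Nat.toDigitsCore] using hacc
  | succ f ih =>
    intro n acc hacc
    simp only [Nat.toDigitsCore]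
    split
    · intro c hc
      rcases List.mem_cons.1 hc with h | h
      · subst h; exact pv_digitChar_mem _ (Nat.mod_lt _ (by norm_num))
      · exact hacc _ h
    · exact ih _ _ (by
        intro c hc
        rcases List.mem_cons.1 hc with h | h
        · subst h; exact pv_digitChar_mem _ (Nat.mod_lt _ (by norm_num))
        · exact hacc _ h)

theorem pv_toDigitsCore_ne_nil (fuel : Nat) : ∀ (n : Nat) (acc : List Char), (fuel ≠ 0 ∨ acc ≠ []) →
    Nat.toDigitsCore 10 fuel n acc ≠ [] := by
  induction fuel with
  | zero => intro n acc h; simpa [Nat.toDigitsCore] using h.resolve_left (by simp)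
  | succ f ih =>
    intro n acc h
    simp only [Nat.toDigitsCore]
    split
    · simp
    · exact ih _ _ (Or.inr (by simp))

theorem pv_enumerate_map {α β : Type} (f : α → β) (xs : List α) : ∀ (s : Int),
    PySem.List.enumerate (xs.map f) s
      = (PySem.List.enumerate xs s).map (fun p => (p.1, f p.2)) := by
  induction xs with
  | nil => intro s; simp [PySem.List.enumerate_nil]
  | cons a t ih => intro s; simp [PySem.List.enumerate_cons, ih]

theorem pv_argmin_fold (l : List Int) : ∀ (s i0 m0 : Int),
    ((∀ x ∈ l, m0 ≤ x) → (PySem.List.enumerate l s).foldl pvStep (i0, m0) = (i0, m0)) ∧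
    (∀ m, PySem.List.min? l (fun x => x) = some m → m < m0 →
      ∃ idx, PySem.List.index? l m = some idx ∧
        (PySem.List.enumerate l s).foldl pvStep (i0, m0) = (s + (idx : Int), m)) := by
  induction l with
  | nil =>
    intro s i0 m0
    constructor
    · intro _; simp [PySem.List.enumerate_nil]
    · intro m hm
      simp [(PySem.List.min?_eq_none_iff ([] : List Int) (fun x => x)).2 rfl] at hm
  | cons a t ih =>
    intro s i0 m0
    constructor
    · intro hle
      have hna : ¬ a < m0 := not_lt.2 (hle a (by simp))
      simp only [PySem.List.enumerate_cons, List.foldl_cons, pvStep, if_neg hna]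
      exact (ih (s+1) i0 m0).1 (fun x hx => hle x (by simp [hx]))
    · intro m hm hmlt
      have hmem : m ∈ a :: t := PySem.List.min?_mem hm
      have hmin : ∀ y ∈ a :: t, m ≤ y := PySem.List.min?_isMin hm
      by_cases hta : ∀ x ∈ t, a ≤ x
      · -- a is the (first) minimum: m = a
        have hma : m = a := le_antisymm (hmin a (by simp))
          (by rcases List.mem_cons.1 hmem with h | h
              · simp [h]
              · exact hta _ h)
        refine ⟨0, ?_, ?_⟩
        · rw [hma]; exact PySem.List.index?_cons_self a t
        · have hstep : pvStep (i0, m0) (s, a) = (s, a) := by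
            simp [pvStep, hma ▸ hmlt]
          simp only [PySem.List.enumerate_cons, List.foldl_cons, hstep]
          have := (ih (s+1) s a).1 (by simpa [hma] using fun x hx => hmin x (List.mem_cons_of_mem _ hx))
          simp [this, hma]
      · -- some element of t is < a; the min of t equals m and m < a
        push Not at hta
        obtain ⟨x, hx, hxa⟩ := hta
        have htne : t ≠ [] := by rintro rfl; simp at hx
        obtain ⟨m', hm'⟩ : ∃ m', PySem.List.min? t (fun x => x) = some m' := by
          cases h : PySem.List.min? t (fun x => x) with
          | none => exact absurd ((PySem.List.min?_eq_none_iff t (fun x => x)).1 h) htne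
          | some v => exact ⟨v, rfl⟩
        have hm'min : ∀ y ∈ t, m' ≤ y := PySem.List.min?_isMin hm'
        have hm'mem : m' ∈ t := PySem.List.min?_mem hm'
        have hm'a : m' < a := lt_of_le_of_lt (hm'min x hx) hxa
        have hmm' : m = m' := le_antisymm (hmin m' (List.mem_cons_of_mem _ hm'mem))
          (by rcases List.mem_cons.1 hmem with h | h
              · exact le_of_lt (h ▸ hm'a)
              · exact hm'min _ h)
        have hne : a ≠ m := by rw [hmm']; exact ne_of_gt hm'a
        by_cases ham : a < m0
        · -- a updates the state first
          have hstep : pvStep (i0, m0) (s, a) = (s, a) := by simp [pvStep, ham]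
          obtain ⟨idx, hidx, hfold⟩ := (ih (s+1) s a).2 m (hmm' ▸ hm') (hmm' ▸ hm'a)
          refine ⟨idx + 1, ?_, ?_⟩
          · rw [PySem.List.index?_cons_of_ne _ hne, hidx]; rfl
          · simp only [PySem.List.enumerate_cons, List.foldl_cons, hstep, hfold,
              Prod.mk.injEq]
            exact ⟨by push_cast; ring, trivial⟩
        · have hstep : pvStep (i0, m0) (s, a) = (i0, m0) := by simp [pvStep, ham]
          obtain ⟨idx, hidx, hfold⟩ := (ih (s+1) i0 m0).2 m (hmm' ▸ hm') hmlt
          refine ⟨idx + 1, ?_, ?_⟩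
          · rw [PySem.List.index?_cons_of_ne _ hne, hidx]; rfl
          · simp only [PySem.List.enumerate_cons, List.foldl_cons, hstep, hfold,
              Prod.mk.injEq]
            exact ⟨by push_cast; ring, trivial⟩

-- 'd in s' for a single character is list membership
theorem pv_isIn_singleton (d : Char) (cs : List Char) :
    PySem.Chars.isIn [d] cs = cs.contains d := by
  by_cases h : d ∈ cs
  · simp [(PySem.Chars.isIn_iff_infix [d] cs).2 ((List.singleton_infix_iff d cs).2 h), h]
  · have : ¬ PySem.Chars.isIn [d] cs = true := fun hc =>
      h ((List.singleton_infix_iff d cs).1 ((PySem.Chars.isIn_iff_infix [d] cs).1 hc))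
    simp [Bool.eq_false_iff.2 this, h]

-- B's value-first search: over a candidate list sorted by digit value, find? picks a member of cs
-- of minimal digit value (when cs is covered by the candidates and nonempty)
theorem pv_find_min (cs : List Char) : ∀ (l : List Char),
    l.Pairwise (fun a b => pvDval a < pvDval b) →
    (∀ c ∈ cs, c ∈ l) → cs ≠ [] →
    ∃ d, l.find? (fun x => cs.contains x) = some d ∧ d ∈ cs ∧ ∀ c ∈ cs, pvDval d ≤ pvDval c := by
  intro l
  induction l with
  | nil =>
    intro _ hsub hne
    rcases List.exists_mem_of_ne_nil cs hne with ⟨c, hc⟩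
    exact absurd (hsub c hc) (by simp)
  | cons a t ih =>
    intro hpw hsub hne
    by_cases ha : a ∈ cs
    · refine ⟨a, ?_, ha, ?_⟩
      · simp [List.find?_cons_of_pos, ha]
      · intro c hc
        rcases List.mem_cons.1 (hsub c hc) with h | h
        · simp [h]
        · exact le_of_lt ((List.pairwise_cons.1 hpw).1 c h)
    · have hsub' : ∀ c ∈ cs, c ∈ t := by
        intro c hc
        rcases List.mem_cons.1 (hsub c hc) with h | h
        · exact absurd (h ▸ hc) ha
        · exact h
      obtain ⟨d, hd, hdcs, hdmin⟩ := ih (List.pairwise_cons.1 hpw).2 hsub' hne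
      refine ⟨d, ?_, hdcs, hdmin⟩
      rw [List.find?_cons_of_neg, hd]
      simp [ha]

-- first index of the first minimal digit value = first index of the corresponding character
theorem pv_index_map (d : Char) (hd : d ∈ pvDigitChars) : ∀ (cs : List Char),
    (∀ c ∈ cs, c ∈ pvDigitChars) →
    PySem.List.index? (cs.map pvDval) (pvDval d) = PySem.List.index? cs d := by
  intro cs
  induction cs with
  | nil => intro _; simp [pysem]
  | cons a t ih =>
    intro hall
    by_cases hval : pvDval a = pvDval d
    · have : a = d := pv_dval_inj a (hall a (by simp)) d hd hval
      subst this
      rw [List.map_cons, PySem.List.index?_cons_self, PySem.List.index?_cons_self]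
    · have hne : a ≠ d := fun h => hval (by rw [h])
      rw [List.map_cons, PySem.List.index?_cons_of_ne _ hval,
        PySem.List.index?_cons_of_ne _ hne, ih (fun c hc => hall c (by simp [hc]))]

-- ===== VERDICT (by name: the statement is the Claim_ definition above) =====
theorem deleteDigit_spec : Claim_equal_deleteDigit := by
  intro n _ hpre
  have hpre' : (10 : Int) ≤ n := hpre
  unfold Spec_deleteDigit
  have hn0 : ¬ n < 0 := by omega
  have hcs : PySem.Int.toChars n = Nat.toDigitsCore 10 (n.toNat + 1) n.toNat [] := by
    simp [PySem.Int.toChars, hn0, Nat.toDigits]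
  have hdig : ∀ c ∈ PySem.Int.toChars n, c ∈ pvDigitChars := by
    rw [hcs]; exact pv_toDigitsCore_mem _ _ [] (by simp)
  have hne : PySem.Int.toChars n ≠ [] := by
    rw [hcs]; exact pv_toDigitsCore_ne_nil _ _ [] (Or.inl (by simp))
  set cs := PySem.Int.toChars n with hcsdef
  set ds := cs.map pvDval with hds
  -- A's fold equals the argmin fold over enumerate ds 0
  have e1 : (PySem.List.pyRange 0 (PySem.List.len cs) 1).foldl
      (fun (st : Int × Int) i =>
        if (PySem.Int.ofChars? [PySem.List.pyGetD cs i '0']).getD 0 < st.2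
        then (i, (PySem.Int.ofChars? [PySem.List.pyGetD cs i '0']).getD 0)
        else st) (0, 9999)
      = ((PySem.List.pyRange 0 (PySem.List.len cs) 1).map
          (fun j => (j, PySem.List.pyGetD cs j '0'))).foldl pvStepC (0, 9999) := by
    simp only [List.foldl_map]
    rfl
  have e2 : ((PySem.List.pyRange 0 (PySem.List.len cs) 1).map
        (fun j => (j, PySem.List.pyGetD cs j '0'))).foldl pvStepC (0, 9999)
      = (PySem.List.enumerate cs 0).foldl pvStepC (0, 9999) := by
    rw [← PySem.List.enumerate_eq_map_pyRange cs '0']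
  have e3 : (PySem.List.enumerate cs 0).foldl pvStepC (0, 9999)
      = ((PySem.List.enumerate cs 0).map (fun p => (p.1, pvDval p.2))).foldl
          pvStep (0, 9999) := by
    simp only [List.foldl_map]
    rfl
  have e4 : ((PySem.List.enumerate cs 0).map (fun p => (p.1, pvDval p.2))).foldl
        pvStep (0, 9999)
      = (PySem.List.enumerate ds 0).foldl pvStep (0, 9999) := by
    rw [← pv_enumerate_map pvDval cs 0]
  have hfoldA := ((e1.trans e2).trans e3).trans e4
  have hnds : ds ≠ [] := by simpa [hds] using hne
  have hbound : ∀ x ∈ ds, x < 9999 := by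
    intro x hx
    obtain ⟨c, hc, rfl⟩ := List.mem_map.1 hx
    exact pv_dval_lt c (hdig c hc)
  obtain ⟨m, hm⟩ : ∃ m, PySem.List.min? ds (fun x => x) = some m := by
    cases h : PySem.List.min? ds (fun x => x) with
    | none => exact absurd ((PySem.List.min?_eq_none_iff ds (fun x => x)).1 h) hnds
    | some v => exact ⟨v, rfl⟩
  have hmlt : m < 9999 := hbound m (PySem.List.min?_mem hm)
  obtain ⟨idx, hidx, hfold⟩ := (pv_argmin_fold ds 0 0 9999).2 m hm hmlt
  -- B's value-first search finds the character of value m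
  obtain ⟨d, hfindd, hdcs, hdmin⟩ := pv_find_min cs pvDigitChars (by decide) hdig hne
  have hm_le : m ≤ pvDval d := PySem.List.min?_isMin hm _ (List.mem_map_of_mem hdcs)
  have hd_le : pvDval d ≤ m := by
    obtain ⟨c0, hc0, hvc0⟩ :=
      List.mem_map.1 (show m ∈ List.map pvDval cs from hds ▸ PySem.List.min?_mem hm)
    exact le_of_le_of_eq (hdmin c0 hc0) hvc0
  have hdm : pvDval d = m := le_antisymm hd_le hm_le
  have hidxcs : PySem.List.index? cs d = some idx := by
    rw [← pv_index_map d (hdig d hdcs) cs hdig, hdm, ← hds, hidx]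
  show deleteDigit n = deleteDigit_alt n
  unfold deleteDigit deleteDigit_alt
  rw [← hcsdef]
  dsimp only
  rw [hfoldA, hfold]
  simp only [pv_isIn_singleton] at hfindd ⊢
  rw [hfindd]
  simp only [Option.getD_some, hidxcs, zero_add]
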